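-- pv_equiv track=rewrite | github.com/miliar/Code_Jam_Webscraper | solutions_python/Problem_178/2382.py | solve
-- ===== SOURCE A (Python) =====
-- def solve(sequence):
--     flips = 0
--     while True:
--         if all(i for i in sequence):
--             return flips
--         elif all(not i for i in sequence):
--             return flips + 1
--         if sequence[0]:
--             flips += 2
--         else:
--             flips += 1
--         for i in range(sequence.index(False), len(sequence)):
--             if not sequence[i]:
--                 sequence[i] = True
--             else:
--                 break
-- ===== SOURCE B (Python) =====
-- def solve(sequence):
--     # Single pass: count maximal runs of falsy (zero) elements.
--     k = 0
--     prev = True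
--     for x in sequence:
--         if not x and prev:
--             k += 1
--         prev = bool(x)
--     if k == 0:
--         return 0
--     return 2 * k - 1 if not sequence[0] else 2 * k
-- ===== Notes on version B (the rewrite author's own statement) =====
-- stated objective: alternative
-- what changed: Replaced the simulate-each-flip loop (repeatedly rescanning and filling the first falsy run with .index/all) by a single pass that counts falsy runs and returns a closed form (0, 2k, or 2k-1 by the leading element); B also leaves the input list unmutated.
import Mathlib
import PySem

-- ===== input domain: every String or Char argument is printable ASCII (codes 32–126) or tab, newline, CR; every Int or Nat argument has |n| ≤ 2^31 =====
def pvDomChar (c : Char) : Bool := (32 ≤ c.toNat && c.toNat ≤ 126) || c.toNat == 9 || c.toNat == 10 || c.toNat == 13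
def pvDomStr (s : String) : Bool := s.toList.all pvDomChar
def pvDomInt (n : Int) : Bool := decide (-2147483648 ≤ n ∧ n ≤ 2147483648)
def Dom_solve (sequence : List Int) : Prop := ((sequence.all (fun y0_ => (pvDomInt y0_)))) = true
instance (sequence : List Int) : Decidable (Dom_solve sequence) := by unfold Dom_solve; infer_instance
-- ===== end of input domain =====

-- B replaces A's repeated fill-first-falsy-run simulation by a single pass counting falsy
-- runs plus a closed form (objective: alternative). A mutates its argument in place
-- (fills zero runs with True); B does not — the equivalence proved here is about the RETURN value.

-- ===== PORT A =====
-- the inner `for i in range(sequence.index(False), len(sequence)) … break` loop: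
-- fill the leading zero run of the suffix with True (True behaves as 1 here)
def fillRun : List Int → List Int
  | [] => []
  | x :: xs => if x == 0 then 1 :: fillRun xs else x :: xs

-- the next three lemmas are cited by solveLoop's decreasing_by
theorem fillRun_count_le (l : List Int) : (fillRun l).count 0 ≤ l.count 0 := by
  induction l with
  | nil => simp [fillRun]
  | cons x xs ih =>
    by_cases hx : x = 0
    · subst hx
      have h1 : fillRun ((0 : Int) :: xs) = 1 :: fillRun xs := by simp [fillRun]
      rw [h1]
      simp
      omega
    · simp [fillRun, hx]

theorem fill_count_lt (l : List Int) (hl : (0 : Int) ∈ l) :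
    ((l.takeWhile (fun x => !(x == 0))) ++ fillRun (l.dropWhile (fun x => !(x == 0)))).count 0
      < l.count 0 := by
  induction l with
  | nil => cases hl
  | cons x xs ih =>
    by_cases hx : x = 0
    · subst hx
      have h1 : fillRun ((0 : Int) :: xs) = 1 :: fillRun xs := by simp [fillRun]
      simp only [List.takeWhile, List.dropWhile, beq_self_eq_true, Bool.not_true,
        List.nil_append, h1, List.count_cons]
      have := fillRun_count_le xs
      simp
      omega
    · have hmem : (0 : Int) ∈ xs := by
        cases hl with
        | head => exact absurd rfl hx
        | tail _ h => exact h
      have := ih hmem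
      simp only [List.takeWhile, List.dropWhile, show ((x == (0:Int))) = false by simpa using hx,
        Bool.not_false, List.cons_append, List.count_cons]
      omega

theorem take_drop_split (l : List Int) (hmem : (0 : Int) ∈ l) :
    l.take ((PySem.List.index? l (0 : Int)).getD 0) = l.takeWhile (fun x => !(x == 0))
      ∧ l.drop ((PySem.List.index? l (0 : Int)).getD 0) = l.dropWhile (fun x => !(x == 0)) := by
  induction l with
  | nil => cases hmem
  | cons x xs ih =>
    by_cases hx : x = 0
    · subst hx
      rw [PySem.List.index?_cons_self]
      simp [List.takeWhile, List.dropWhile]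
    · have hmem' : (0 : Int) ∈ xs := by
        cases hmem with
        | head => exact absurd rfl hx
        | tail _ h => exact h
      have hxf : ((x == (0:Int))) = false := by simpa using hx
      rcases Option.isSome_iff_exists.mp
          ((PySem.List.index?_isSome_iff (xs := xs) (v := (0:Int))).mpr hmem') with ⟨j, hj⟩
      rcases ih hmem' with ⟨iht, ihd⟩
      rw [hj] at iht ihd
      rw [PySem.List.index?_cons_of_ne xs hx, hj]
      simp only [Option.map_some, Option.getD_some] at *
      simp [List.takeWhile, List.dropWhile, hxf, iht, ihd]

-- the `while True` loop of A; flips is the accumulator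
def solveLoop (sequence : List Int) (flips : Int) : Int :=
  if sequence.all (fun i => !(i == 0)) then flips
  else if sequence.all (fun i => i == 0) then flips + 1
  else
    -- sequence[0]: the list is nonempty in this branch, so headI is exact here
    let flips' := if sequence.headI ≠ 0 then flips + 2 else flips + 1
    -- sequence.index(False): False == 0 in Python; the index exists in this branch
    let idx := (PySem.List.index? sequence (0 : Int)).getD 0
    solveLoop (sequence.take idx ++ fillRun (sequence.drop idx)) flips'
termination_by sequence.count 0
decreasing_by
  rename_i h1 _h2
  have hmem : (0 : Int) ∈ sequence := by
    by_contra hc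
    apply h1
    refine List.all_eq_true.mpr (fun x hx => ?_)
    have hxne : x ≠ 0 := fun h => hc (h ▸ hx)
    simpa using hxne
  rcases take_drop_split sequence hmem with ⟨ht, hd⟩
  rw [ht, hd]
  exact fill_count_lt sequence hmem

def solve (sequence : List Int) : Int := solveLoop sequence 0

-- ===== PORT B =====
-- the loop body of B: state = (k, prev)
def stepB (s : Int × Bool) (x : Int) : Int × Bool :=
  (if x == 0 && s.2 then s.1 + 1 else s.1, !(x == 0))

def solve_alt (sequence : List Int) : Int :=
  let st := sequence.foldl stepB ((0 : Int), true)
  if st.1 = 0 then 0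
  else if sequence.headI = 0 then 2 * st.1 - 1 else 2 * st.1

-- ===== PRECONDITION & SPEC =====
def Spec_solve (sequence : List Int) (out : Int) : Prop := out = solve_alt sequence
instance (sequence : List Int) (out : Int) : Decidable (Spec_solve sequence out) := by unfold Spec_solve; infer_instance

-- ===== CLAIM (what is proved, stated in full; the proofs are below) =====
def Claim_equal_solve : Prop := ∀ (sequence : List Int), Dom_solve sequence → Spec_solve sequence (solve sequence)

-- ===== LEMMAS AND PROOFS =====

-- recursive form of B's run counter
def kcount : List Int → Bool → Int
  | [], _ => 0
  | x :: xs, prev => (if x == 0 && prev then 1 else 0) + kcount xs (!(x == 0))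

theorem foldl_stepB (l : List Int) (k0 : Int) (prev : Bool) :
    (l.foldl stepB (k0, prev)).1 = k0 + kcount l prev := by
  induction l generalizing k0 prev with
  | nil => simp [kcount]
  | cons x xs ih =>
    simp only [List.foldl_cons, stepB, kcount]
    rw [ih]
    split <;> ring

theorem solve_alt_eq (l : List Int) :
    solve_alt l = if kcount l true = 0 then 0
      else if l.headI = 0 then 2 * kcount l true - 1 else 2 * kcount l true := by
  simp [solve_alt, foldl_stepB]

theorem kcount_nonneg (l : List Int) (prev : Bool) : 0 ≤ kcount l prev := by
  induction l generalizing prev with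
  | nil => simp [kcount]
  | cons x xs ih =>
    simp only [kcount]
    have := ih (!(x == 0))
    split <;> omega

theorem kcount_eq_zero (l : List Int) (prev : Bool) (h : ∀ x ∈ l, x ≠ 0) :
    kcount l prev = 0 := by
  induction l generalizing prev with
  | nil => simp [kcount]
  | cons x xs ih =>
    have hx : x ≠ 0 := h x (List.mem_cons_self ..)
    simp [kcount, hx, ih _ (fun y hy => h y (List.mem_cons_of_mem _ hy))]

theorem kcount_pos (l : List Int) (h : (0 : Int) ∈ l) : 1 ≤ kcount l true := by
  induction l with
  | nil => cases h
  | cons x xs ih =>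
    by_cases hx : x = 0
    · subst hx
      simp only [kcount]
      have := kcount_nonneg xs (!((0:Int) == 0))
      simp_all
    · have hmem : (0 : Int) ∈ xs := by
        cases h with
        | head => exact absurd rfl hx
        | tail _ h' => exact h'
      simpa [kcount, show ((x == (0:Int))) = false by simpa using hx] using ih hmem

theorem kcount_false_all_zero (l : List Int) (h : ∀ x ∈ l, x = 0) :
    kcount l false = 0 := by
  induction l with
  | nil => simp [kcount]
  | cons x xs ih =>
    have hx : x = 0 := h x (List.mem_cons_self ..)
    subst hx
    simpa [kcount] using ih (fun y hy => h y (List.mem_cons_of_mem _ hy))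

theorem kcount_all_zero (l : List Int) (h : ∀ x ∈ l, x = 0) (hne : l ≠ []) :
    kcount l true = 1 := by
  cases l with
  | nil => exact absurd rfl hne
  | cons x xs =>
    have hx : x = 0 := h x (List.mem_cons_self ..)
    subst hx
    simpa [kcount] using kcount_false_all_zero xs (fun y hy => h y (List.mem_cons_of_mem _ hy))

theorem kcount_fillRun (l : List Int) : kcount (fillRun l) true = kcount l false := by
  induction l with
  | nil => simp [fillRun, kcount]
  | cons x xs ih =>
    by_cases hx : x = 0
    · subst hx; simpa [fillRun, kcount] using ih
    · simp [fillRun, hx, kcount]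

theorem kcount_fill_step (l : List Int) (h : (0 : Int) ∈ l) :
    kcount ((l.takeWhile (fun x => !(x == 0))) ++ fillRun (l.dropWhile (fun x => !(x == 0)))) true
      = kcount l true - 1 := by
  induction l with
  | nil => cases h
  | cons x xs ih =>
    by_cases hx : x = 0
    · subst hx
      simp only [List.takeWhile, List.dropWhile, beq_self_eq_true, Bool.not_true,
        List.nil_append, kcount]
      simp [fillRun, kcount, kcount_fillRun]
    · have hmem : (0 : Int) ∈ xs := by
        cases h with
        | head => exact absurd rfl hx
        | tail _ h' => exact h'
      have hthis := ih hmem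
      have hxf : ((x == (0:Int))) = false := by simpa using hx
      simp only [List.takeWhile, List.dropWhile, hxf, Bool.not_false, List.cons_append, kcount]
      simp only [Bool.false_and]
      omega

theorem headI_fill_ne (l : List Int) (h : (0 : Int) ∈ l) :
    ((l.takeWhile (fun x => !(x == 0))) ++ fillRun (l.dropWhile (fun x => !(x == 0)))).headI ≠ 0 := by
  cases l with
  | nil => cases h
  | cons x xs =>
    by_cases hx : x = 0
    · subst hx
      simp [List.takeWhile, List.dropWhile, fillRun]
    · simp [List.takeWhile, List.dropWhile, show ((x == (0:Int))) = false by simpa using hx, hx]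

theorem loop_eq (n : ℕ) : ∀ (l : List Int), l.count 0 ≤ n →
    ∀ (flips : Int), solveLoop l flips = flips + solve_alt l := by
  induction n with
  | zero =>
    intro l h flips
    have hno : ∀ x ∈ l, x ≠ 0 := by
      intro x hx hx0
      subst hx0
      have := List.count_pos_iff.mpr hx
      omega
    have hall : l.all (fun i => !(i == 0)) = true := by
      simp only [List.all_eq_true]
      intro x hx; simpa using hno x hx
    rw [solveLoop, if_pos hall, solve_alt_eq, if_pos (kcount_eq_zero l true hno)]
    ring
  | succ n ih =>
    intro l h flips
    rw [solveLoop]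
    by_cases h1 : l.all (fun i => !(i == 0)) = true
    · have hno : ∀ x ∈ l, x ≠ 0 := by
        intro x hx
        simpa using List.all_eq_true.mp h1 x hx
      rw [if_pos h1, solve_alt_eq, if_pos (kcount_eq_zero l true hno)]
      ring
    · rw [if_neg h1]
      have hmem : (0 : Int) ∈ l := by
        by_contra hc
        apply h1
        refine List.all_eq_true.mpr (fun x hx => ?_)
        have hxne : x ≠ 0 := fun h => hc (h ▸ hx)
        simpa using hxne
      have hne : l ≠ [] := by rintro rfl; cases hmem
      by_cases h2 : l.all (fun i => i == 0) = true
      · have hz : ∀ x ∈ l, x = 0 := by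
          intro x hx; simpa using List.all_eq_true.mp h2 x hx
        have hh : l.headI = 0 := by
          cases l with
          | nil => exact absurd rfl hne
          | cons x xs => exact hz x (List.mem_cons_self ..)
        rw [if_pos h2, solve_alt_eq, kcount_all_zero l hz hne]
        simp [hh]
      · rw [if_neg h2]
        rcases take_drop_split l hmem with ⟨ht, hd⟩
        simp only [ht, hd]
        set l' := (l.takeWhile (fun x => !(x == 0))) ++ fillRun (l.dropWhile (fun x => !(x == 0)))
          with hl'
        have hcnt : l'.count 0 ≤ n := by
          have hlt : l'.count 0 < l.count 0 := by rw [hl']; exact fill_count_lt l hmem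
          omega
        rw [ih l' hcnt]
        have hk : kcount l' true = kcount l true - 1 := kcount_fill_step l hmem
        have hh' : l'.headI ≠ 0 := headI_fill_ne l hmem
        have hk1 : 1 ≤ kcount l true := kcount_pos l hmem
        rw [solve_alt_eq l', solve_alt_eq l, hk]
        have hkne : ¬ kcount l true = 0 := by omega
        rw [if_neg hkne, if_neg hh']
        by_cases hcase : kcount l true - 1 = 0
        · rw [if_pos hcase]
          by_cases hhl : l.headI = 0
          · simp only [hhl, ite_true]
            split <;> omega
          · simp only [hhl, ite_false]
            split <;> omega
        · rw [if_neg hcase]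
          by_cases hhl : l.headI = 0
          · simp only [hhl, ite_true]
            split <;> omega
          · simp only [hhl, ite_false]
            split <;> omega

-- ===== VERDICT (by name: the statement is the Claim_ definition above) =====
theorem solve_spec : Claim_equal_solve := by
  intro sequence _
  unfold Spec_solve solve
  simpa using loop_eq (sequence.count 0) sequence le_rfl 0
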